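-- pv_equiv track=rewrite | github.com/aimacode/aima-python | submissions/Carei/mySearches.py | state2list
-- ===== SOURCE A (Python) =====
-- def state2list(state):
--     list = []
--     rows = state.split('|')
--     for row in rows:
--         cells = row.split(',')
--         for cell in cells:
--             list.append(cell)
--     return list
-- ===== SOURCE B (Python) =====
-- def state2list(state):
--     return state.replace('|', ',').split(',')
-- ===== Notes on version B (the rewrite author's own statement) =====
-- stated objective: simpler
-- what changed: B normalises '|' to ',' with one replace and does a single flat split, replacing A's nested split-and-append loops with loop-free code.
import Mathlib
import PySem

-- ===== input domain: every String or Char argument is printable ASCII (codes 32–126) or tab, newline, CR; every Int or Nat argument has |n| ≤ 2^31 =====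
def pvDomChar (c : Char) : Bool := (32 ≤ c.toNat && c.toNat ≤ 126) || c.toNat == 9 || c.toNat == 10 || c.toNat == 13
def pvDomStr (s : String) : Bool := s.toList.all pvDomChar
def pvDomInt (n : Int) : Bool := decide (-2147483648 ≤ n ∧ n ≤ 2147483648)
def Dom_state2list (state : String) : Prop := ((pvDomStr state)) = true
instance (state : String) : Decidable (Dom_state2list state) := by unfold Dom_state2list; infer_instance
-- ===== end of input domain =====

-- B replaces A's nested split('|')/split(',') append loops by one '|'→',' replace and a single flat split (objective: simpler).

-- ===== PORT A =====
def state2list (state : String) : List String :=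
  let rows := (PySem.Str.split? state "|").getD []
  rows.foldl (fun acc row =>
    let cells := (PySem.Str.split? row ",").getD []
    cells.foldl (fun acc2 cell => acc2 ++ [cell]) acc) []

-- ===== PORT B =====
def state2list_alt (state : String) : List String :=
  (PySem.Str.split? (PySem.Str.replace state "|" ",") ",").getD []

-- ===== PRECONDITION & SPEC =====
def Spec_state2list (state : String) (out : List String) : Prop := out = state2list_alt state
instance (state : String) (out : List String) : Decidable (Spec_state2list state out) := by unfold Spec_state2list; infer_instance

-- ===== CLAIM (what is proved, stated in full; the proofs are below) =====
def Claim_equal_state2list : Prop := ∀ (state : String), Dom_state2list state → Spec_state2list state (state2list state)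

-- ===== LEMMAS AND PROOFS =====

-- simple structural model of splitting on a single character
def pvConsHead (x : Char) : List (List Char) → List (List Char)
  | [] => [[x]]
  | h :: tl => (x :: h) :: tl

def pvSplit (c : Char) : List Char → List (List Char)
  | [] => [[]]
  | x :: t => if c == x then [] :: pvSplit c t else pvConsHead x (pvSplit c t)

def pvConsHeadL (p : List Char) : List (List Char) → List (List Char)
  | [] => [p]
  | h :: tl => (p ++ h) :: tl

theorem pvSplit_ne_nil (c : Char) (l : List Char) : pvSplit c l ≠ [] := by
  cases l with
  | nil => simp [pvSplit]
  | cons x t =>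
    simp only [pvSplit]
    split
    · simp
    · cases h : pvSplit c t <;> simp [pvConsHead]

theorem splitOn_go_eq (c : Char) (l : List Char) :
    ∀ (fuel : Nat) (cur : List Char) (acc : List (List Char)), l.length ≤ fuel →
    PySem.Chars.splitOn.go [c] fuel l cur acc
      = acc.reverse ++ pvConsHeadL cur.reverse (pvSplit c l) := by
  induction l with
  | nil =>
    intro fuel cur acc _
    cases fuel <;> simp [PySem.Chars.splitOn.go, pvSplit, pvConsHeadL]
  | cons x t ih =>
    intro fuel cur acc hle
    cases fuel with
    | zero => simp at hle
    | succ fuel =>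
      rw [PySem.Chars.splitOn.go]
      have hpre : List.isPrefixOf [c] (x :: t) = (c == x) := by
        simp [List.isPrefixOf]
      by_cases hcx : c == x
      · rw [hpre, if_pos hcx]
        simp only [List.length_cons] at hle
        simp only [List.length_cons, List.length_nil, List.drop_succ_cons, List.drop_zero]
        rw [ih fuel [] (cur.reverse :: acc) (by omega)]
        simp only [pvSplit, if_pos hcx, List.reverse_cons, List.reverse_nil]
        obtain ⟨h, tl, hM⟩ : ∃ h tl, pvSplit c t = h :: tl := by
          cases hM : pvSplit c t with
          | nil => exact absurd hM (pvSplit_ne_nil c t)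
          | cons h tl => exact ⟨h, tl, rfl⟩
        simp [hM, pvConsHeadL]
      · rw [hpre, if_neg hcx]
        simp only [List.length_cons] at hle
        rw [ih fuel (x :: cur) acc (by omega)]
        simp only [pvSplit, if_neg hcx]
        cases hM : pvSplit c t with
        | nil => exact absurd hM (pvSplit_ne_nil c t)
        | cons h tl => simp [pvConsHead, pvConsHeadL]

theorem splitOn_eq (c : Char) (l : List Char) :
    PySem.Chars.splitOn l [c] = pvSplit c l := by
  rw [PySem.Chars.splitOn, splitOn_go_eq c l (l.length + 1) [] [] (by omega)]
  cases hM : pvSplit c l with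
  | nil => exact absurd hM (pvSplit_ne_nil c l)
  | cons h tl => simp [pvConsHeadL]

theorem replace_go_eq (a b : Char) (l : List Char) :
    ∀ (fuel : Nat) (acc : List Char), l.length ≤ fuel →
    PySem.Chars.replace.go [a] [b] fuel l acc
      = acc.reverse ++ l.map (fun x => if a == x then b else x) := by
  induction l with
  | nil =>
    intro fuel acc _
    cases fuel <;> simp [PySem.Chars.replace.go]
  | cons x t ih =>
    intro fuel acc hle
    cases fuel with
    | zero => simp at hle
    | succ fuel =>
      rw [PySem.Chars.replace.go]
      have hpre : List.isPrefixOf [a] (x :: t) = (a == x) := by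
        simp [List.isPrefixOf]
      simp only [List.length_cons] at hle
      by_cases hax : a == x
      · rw [hpre, if_pos hax]
        simp only [List.length_cons, List.length_nil, List.drop_succ_cons, List.drop_zero]
        rw [ih fuel ([b].reverse ++ acc) (by omega)]
        obtain rfl := eq_of_beq hax
        simp
      · rw [hpre, if_neg hax]
        rw [ih fuel (x :: acc) (by omega)]
        simp only [List.map_cons, if_neg hax]
        simp

theorem replace_eq (a b : Char) (l : List Char) :
    PySem.Chars.replace l [a] [b] = l.map (fun x => if a == x then b else x) := by
  rw [PySem.Chars.replace]
  simp only [List.isEmpty_cons, if_false, Bool.false_eq_true]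
  exact replace_go_eq a b l l.length [] (le_refl _)

theorem pvConsHeadL_append (p : List Char) (M N : List (List Char)) (hM : M ≠ []) :
    pvConsHeadL p (M ++ N) = pvConsHeadL p M ++ N := by
  cases M with
  | nil => exact absurd rfl hM
  | cons h tl => simp [pvConsHeadL]

theorem pvConsHead_eq (x : Char) (M : List (List Char)) :
    pvConsHead x M = pvConsHeadL [x] M := by
  cases M <;> simp [pvConsHead, pvConsHeadL]

-- the heart: splitting the normalised string on ',' = flattening the two-level split
theorem pvSplit_map_norm (l : List Char) :
    pvSplit ',' (l.map (fun x => if '|' == x then ',' else x))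
      = (pvSplit '|' l).flatMap (fun r => pvSplit ',' r) := by
  induction l with
  | nil => simp [pvSplit]
  | cons x t ih =>
    by_cases hb : '|' == x
    · simp only [List.map_cons, if_pos hb, pvSplit, List.flatMap_cons]
      rw [if_pos (show (((',' : Char) == ',') = true) from rfl), ih]
      rfl
    · simp only [List.map_cons]
      rw [if_neg hb]
      simp only [pvSplit, if_neg hb]
      by_cases hc : ',' == x
      · rw [if_pos hc]
        obtain ⟨h, tl, hM⟩ : ∃ h tl, pvSplit '|' t = h :: tl := by
          cases hM : pvSplit '|' t with
          | nil => exact absurd hM (pvSplit_ne_nil '|' t)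
          | cons h tl => exact ⟨h, tl, rfl⟩
        rw [hM, pvConsHead, List.flatMap_cons]
        simp only [pvSplit, if_pos hc]
        rw [ih, hM, List.flatMap_cons, List.cons_append]
      · rw [if_neg hc]
        obtain ⟨h, tl, hM⟩ : ∃ h tl, pvSplit '|' t = h :: tl := by
          cases hM : pvSplit '|' t with
          | nil => exact absurd hM (pvSplit_ne_nil '|' t)
          | cons h tl => exact ⟨h, tl, rfl⟩
        rw [hM, pvConsHead, List.flatMap_cons]
        simp only [pvSplit, if_neg hc]
        rw [ih, hM, List.flatMap_cons]
        rw [pvConsHead_eq, pvConsHead_eq,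
          pvConsHeadL_append _ _ _ (by cases hN : pvSplit ',' h <;> simp_all [pvSplit_ne_nil])]

theorem str_split_single (s : String) (c : Char) :
    (PySem.Str.split? s (String.ofList [c])).getD []
      = (pvSplit c s.toList).map (fun cs => String.ofList cs) := by
  have h := PySem.Str.split?_map s (String.ofList [c])
  rw [String.toList_ofList] at h
  rw [PySem.Chars.split?] at h
  simp only [List.isEmpty_cons, if_false, Bool.false_eq_true] at h
  cases hs : PySem.Str.split? s (String.ofList [c]) with
  | none => rw [hs] at h; simp at h
  | some rows =>
    rw [hs] at h
    simp only [Option.map_some, Option.some.injEq] at h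
    rw [splitOn_eq] at h
    simp only [Option.getD_some]
    have h2 : (pvSplit c s.toList).map (fun cs => String.ofList cs)
        = (rows.map String.toList).map (fun cs => String.ofList cs) := by rw [h]
    rw [h2, List.map_map]
    simp only [Function.comp_def, String.ofList_toList, List.map_id_fun', id]

-- ===== VERDICT (by name: the statement is the Claim_ definition above) =====
theorem state2list_spec : Claim_equal_state2list := by
  intro state _
  unfold Spec_state2list state2list state2list_alt
  -- A side: collapse the two append loops into a flatMap
  have hA : ∀ (rows : List String) (acc : List String),
      rows.foldl (fun acc row =>
        ((PySem.Str.split? row ",").getD []).foldl (fun acc2 cell => acc2 ++ [cell]) acc) acc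
      = acc ++ rows.flatMap (fun row => (PySem.Str.split? row ",").getD []) := by
    intro rows acc
    simp only [PySem.List.foldl_append_singleton_eq_self]
    exact PySem.List.foldl_append_eq_flatMap _ rows acc
  rw [hA, List.nil_append]
  -- both sides down to pvSplit on char lists
  have hcomma : ("," : String) = String.ofList [','] := rfl
  have hbar : ("|" : String) = String.ofList ['|'] := rfl
  rw [hcomma, hbar, str_split_single state '|', str_split_single _ ',']
  have hrepl : (PySem.Str.replace state (String.ofList ['|']) (String.ofList [','])).toList
      = state.toList.map (fun x => if '|' == x then ',' else x) := by
    rw [PySem.Str.toList_replace]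
    exact replace_eq '|' ',' state.toList
  rw [hrepl, pvSplit_map_norm, List.flatMap_map]
  rw [List.map_flatMap]
  congr 1
  funext r
  rw [str_split_single (String.ofList r) ',']
  simp
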